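-- pv_equiv track=rewrite | github.com/egeulgen/Bioinformatics_Specialization | Bioinformatics III/Week V/TwoBreakDistance.py | ColoredEdges
-- ===== SOURCE A (Python) =====
-- def ChromosomeToCycle(Chromosome):
--     Nodes = []
--     for block in Chromosome:
--         if block > 0:
--             Nodes.append(2 * block - 1)
--             Nodes.append(2 * block)
--         else:
--             Nodes.append(-2 * block)
--             Nodes.append(-2 * block - 1)
--     return Nodes
--
-- def ColoredEdges(P):
--     Edges = []
--     for Chromosome in P:
--         Nodes = ChromosomeToCycle(Chromosome)
--         for j in range(1, len(Nodes), 2):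
--             if j != len(Nodes) - 1:
--                 Edges.append([Nodes[j], Nodes[j + 1]])
--             else:
--                 Edges.append([Nodes[j], Nodes[0]])
--     return Edges
-- ===== SOURCE B (Python) =====
-- def ColoredEdges(P):
--     Edges = []
--     for Chromosome in P:
--         heads = [2 * b - 1 if b > 0 else -2 * b for b in Chromosome]
--         tails = [2 * b if b > 0 else -2 * b - 1 for b in Chromosome]
--         n = len(Chromosome)
--         Edges.extend([tails[i], heads[(i + 1) % n]] for i in range(n))
--     return Edges
-- ===== Notes on version B (the rewrite author's own statement) =====
-- stated objective: simpler
-- what changed: B drops the ChromosomeToCycle helper and the flat node list entirely: it computes each block's head/tail endpoint nodes directly and pairs each block's tail with the cyclically next block's head via (i+1) % n, instead of building a 2n node list and scanning its odd positions with a last-edge special case.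
import Mathlib
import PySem

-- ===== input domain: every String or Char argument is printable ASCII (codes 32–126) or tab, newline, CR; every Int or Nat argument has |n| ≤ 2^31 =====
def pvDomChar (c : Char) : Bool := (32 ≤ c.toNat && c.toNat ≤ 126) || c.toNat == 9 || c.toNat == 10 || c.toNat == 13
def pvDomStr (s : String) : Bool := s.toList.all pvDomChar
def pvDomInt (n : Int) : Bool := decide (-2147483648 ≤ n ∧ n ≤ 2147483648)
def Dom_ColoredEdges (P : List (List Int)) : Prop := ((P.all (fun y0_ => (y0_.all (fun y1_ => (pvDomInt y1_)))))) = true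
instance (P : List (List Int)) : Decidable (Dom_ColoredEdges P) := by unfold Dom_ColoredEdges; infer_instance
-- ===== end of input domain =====

-- B drops the ChromosomeToCycle node list: it computes per-block head/tail endpoints directly
-- and pairs each block's tail with the cyclically next block's head (objective: simpler).

-- ===== PORT A =====
def ChromosomeToCycle (Chromosome : List Int) : List Int :=
  Chromosome.foldl (fun Nodes block =>
    if block > 0 then (Nodes ++ [2 * block - 1]) ++ [2 * block]
    else (Nodes ++ [-2 * block]) ++ [-2 * block - 1]) []

def ColoredEdges (P : List (List Int)) : List (List Int) :=
  P.foldl (fun Edges Chromosome =>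
    let Nodes := ChromosomeToCycle Chromosome
    (PySem.List.pyRange 1 (Nodes.length : Int) 2).foldl (fun Edges j =>
      if j ≠ (Nodes.length : Int) - 1 then
        Edges ++ [[PySem.List.pyGetD Nodes j 0, PySem.List.pyGetD Nodes (j + 1) 0]]
      else
        Edges ++ [[PySem.List.pyGetD Nodes j 0, PySem.List.pyGetD Nodes 0 0]]) Edges) []

-- ===== PORT B =====
def headOf (b : Int) : Int := if b > 0 then 2 * b - 1 else -2 * b

def tailOf (b : Int) : Int := if b > 0 then 2 * b else -2 * b - 1

def ColoredEdges_alt (P : List (List Int)) : List (List Int) :=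
  P.foldl (fun Edges Chromosome =>
    let heads := Chromosome.map headOf
    let tails := Chromosome.map tailOf
    let n := Chromosome.length
    Edges ++ (List.range n).map (fun i => [tails.getD i 0, heads.getD ((i + 1) % n) 0])) []

-- ===== PRECONDITION & SPEC =====
def Spec_ColoredEdges (P : List (List Int)) (out : List (List Int)) : Prop := out = ColoredEdges_alt P
instance (P : List (List Int)) (out : List (List Int)) : Decidable (Spec_ColoredEdges P out) := by unfold Spec_ColoredEdges; infer_instance

-- ===== CLAIM (what is proved, stated in full; the proofs are below) =====
def Claim_equal_ColoredEdges : Prop := ∀ (P : List (List Int)), Dom_ColoredEdges P → Spec_ColoredEdges P (ColoredEdges P)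

-- ===== LEMMAS AND PROOFS =====

-- the flat node list A builds, as a flatMap of per-block pairs
def pairOf (b : Int) : List Int := [headOf b, tailOf b]

lemma cyc_aux (c : List Int) : ∀ (acc : List Int),
    c.foldl (fun Nodes block =>
      if block > 0 then (Nodes ++ [2 * block - 1]) ++ [2 * block]
      else (Nodes ++ [-2 * block]) ++ [-2 * block - 1]) acc = acc ++ c.flatMap pairOf := by
  induction c with
  | nil => simp
  | cons b t ih =>
    intro acc
    simp only [List.foldl_cons, List.flatMap_cons, ih]
    by_cases hb : b > 0 <;> simp [hb, pairOf, headOf, tailOf]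

lemma cyc_eq (c : List Int) : ChromosomeToCycle c = c.flatMap pairOf := by
  unfold ChromosomeToCycle
  rw [cyc_aux c []]
  simp

lemma flat_length (c : List Int) : (c.flatMap pairOf).length = 2 * c.length := by
  induction c with
  | nil => simp
  | cons b t ih => simp [pairOf, ih]; omega

lemma getD_map (f : Int → Int) (c : List Int) (k : Nat) (h : k < c.length) :
    (c.map f).getD k 0 = f (c.getD k 0) := by
  simp [List.getD_eq_getElem?_getD, h]

lemma flat_getD_even (c : List Int) : ∀ (k : Nat), k < c.length →
    (c.flatMap pairOf).getD (2 * k) 0 = headOf (c.getD k 0) := by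
  induction c with
  | nil => simp
  | cons b t ih =>
    intro k hk
    cases k with
    | zero => simp [pairOf]
    | succ m =>
      have h2 : 2 * (m + 1) = (2 * m) + 2 := by omega
      simp only [List.flatMap_cons, pairOf, h2]
      simpa [pairOf] using ih m (by simpa using hk)

lemma flat_getD_odd (c : List Int) : ∀ (k : Nat), k < c.length →
    (c.flatMap pairOf).getD (2 * k + 1) 0 = tailOf (c.getD k 0) := by
  induction c with
  | nil => simp
  | cons b t ih =>
    intro k hk
    cases k with
    | zero => simp [pairOf]
    | succ m =>
      have h2 : 2 * (m + 1) + 1 = (2 * m + 1) + 2 := by omega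
      simp only [List.flatMap_cons, pairOf, h2]
      simpa [pairOf] using ih m (by simpa using hk)

lemma range_two (n : Nat) :
    PySem.List.pyRange 1 (2 * (n : Int)) 2 = List.map (fun k : Nat => (1 : Int) + 2 * (k : Int)) (List.range n) := by
  rw [PySem.List.pyRange_of_pos _ _ (by norm_num)]
  have hcnt : (if (1 : Int) < 2 * (n : Int) then ((2 * (n : Int) - 1 + 2 - 1) / 2).toNat else 0) = n := by
    rcases Nat.eq_zero_or_pos n with h | h
    · simp [h]
    · rw [if_pos (by omega)]
      have h2 : (2 * (n : Int) - 1 + 2 - 1) = 2 * (n : Int) := by ring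
      rw [h2, Int.mul_ediv_cancel_left _ (by norm_num)]
      simp
  rw [hcnt]

-- per-chromosome edge list of port A
def edgesA (c : List Int) : List (List Int) :=
  (PySem.List.pyRange 1 ((ChromosomeToCycle c).length : Int) 2).map (fun j =>
    if j ≠ ((ChromosomeToCycle c).length : Int) - 1 then
      [PySem.List.pyGetD (ChromosomeToCycle c) j 0, PySem.List.pyGetD (ChromosomeToCycle c) (j + 1) 0]
    else
      [PySem.List.pyGetD (ChromosomeToCycle c) j 0, PySem.List.pyGetD (ChromosomeToCycle c) 0 0])

-- per-chromosome edge list of port B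
def edgesB (c : List Int) : List (List Int) :=
  (List.range c.length).map (fun i =>
    [(c.map tailOf).getD i 0, (c.map headOf).getD ((i + 1) % c.length) 0])

lemma bodyA_eq (acc : List (List Int)) (c : List Int) :
    (PySem.List.pyRange 1 ((ChromosomeToCycle c).length : Int) 2).foldl (fun Edges j =>
      if j ≠ ((ChromosomeToCycle c).length : Int) - 1 then
        Edges ++ [[PySem.List.pyGetD (ChromosomeToCycle c) j 0, PySem.List.pyGetD (ChromosomeToCycle c) (j + 1) 0]]
      else
        Edges ++ [[PySem.List.pyGetD (ChromosomeToCycle c) j 0, PySem.List.pyGetD (ChromosomeToCycle c) 0 0]]) acc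
    = acc ++ edgesA c := by
  have hf : (fun (Edges : List (List Int)) (j : Int) =>
      if j ≠ ((ChromosomeToCycle c).length : Int) - 1 then
        Edges ++ [[PySem.List.pyGetD (ChromosomeToCycle c) j 0, PySem.List.pyGetD (ChromosomeToCycle c) (j + 1) 0]]
      else
        Edges ++ [[PySem.List.pyGetD (ChromosomeToCycle c) j 0, PySem.List.pyGetD (ChromosomeToCycle c) 0 0]])
    = (fun Edges j => Edges ++
        [if j ≠ ((ChromosomeToCycle c).length : Int) - 1 then
          [PySem.List.pyGetD (ChromosomeToCycle c) j 0, PySem.List.pyGetD (ChromosomeToCycle c) (j + 1) 0]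
        else
          [PySem.List.pyGetD (ChromosomeToCycle c) j 0, PySem.List.pyGetD (ChromosomeToCycle c) 0 0]]) := by
    funext Edges j
    split <;> rfl
  rw [hf, PySem.List.foldl_append_singleton_eq_map]
  rfl

lemma edges_eq (c : List Int) : edgesA c = edgesB c := by
  unfold edgesA edgesB
  rw [cyc_eq, flat_length]
  have hcast : ((2 * c.length : Nat) : Int) = 2 * (c.length : Int) := by push_cast; ring
  rw [hcast, range_two, List.map_map]
  apply List.map_congr_left
  intro k hk
  have hk' : k < c.length := List.mem_range.mp hk
  simp only [Function.comp_apply]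
  by_cases hlast : k + 1 < c.length
  · have hne : (1 + 2 * (k : Int)) ≠ 2 * (c.length : Int) - 1 := by omega
    rw [if_pos hne]
    have e1 : (1 + 2 * (k : Int)) = ((2 * k + 1 : Nat) : Int) := by push_cast; ring
    have e2 : (1 + 2 * (k : Int)) + 1 = ((2 * (k + 1) : Nat) : Int) := by push_cast; ring
    have e2' : PySem.List.pyGetD (c.flatMap pairOf) (1 + 2 * (k : Int) + 1) 0
        = (c.flatMap pairOf).getD (2 * (k + 1)) 0 := by
      rw [e2, PySem.List.pyGetD_natCast]
    rw [e2', flat_getD_even c (k + 1) hlast, e1, PySem.List.pyGetD_natCast]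
    rw [flat_getD_odd c k hk']
    rw [Nat.mod_eq_of_lt hlast]
    rw [getD_map tailOf c k hk', getD_map headOf c (k + 1) hlast]
  · have hkk : k + 1 = c.length := by omega
    have hne : ¬ ((1 + 2 * (k : Int)) ≠ 2 * (c.length : Int) - 1) := by
      simp only [ne_eq, not_not]; omega
    rw [if_neg hne]
    have e1 : (1 + 2 * (k : Int)) = ((2 * k + 1 : Nat) : Int) := by push_cast; ring
    have h0 : (c.flatMap pairOf).getD 0 0 = headOf (c.getD 0 0) := by
      simpa using flat_getD_even c 0 (by omega)
    rw [e1, PySem.List.pyGetD_natCast, flat_getD_odd c k hk', PySem.List.pyGetD_zero, h0]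
    rw [hkk, Nat.mod_self]
    rw [getD_map tailOf c k hk', getD_map headOf c 0 (by omega)]

lemma ports_eq (P : List (List Int)) : ColoredEdges P = ColoredEdges_alt P := by
  unfold ColoredEdges ColoredEdges_alt
  have hb : ∀ (acc : List (List Int)) (c : List Int),
      (fun (Edges : List (List Int)) (Chromosome : List Int) =>
        (PySem.List.pyRange 1 ((ChromosomeToCycle Chromosome).length : Int) 2).foldl (fun Edges j =>
          if j ≠ ((ChromosomeToCycle Chromosome).length : Int) - 1 then
            Edges ++ [[PySem.List.pyGetD (ChromosomeToCycle Chromosome) j 0,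
                       PySem.List.pyGetD (ChromosomeToCycle Chromosome) (j + 1) 0]]
          else
            Edges ++ [[PySem.List.pyGetD (ChromosomeToCycle Chromosome) j 0,
                       PySem.List.pyGetD (ChromosomeToCycle Chromosome) 0 0]]) Edges) acc c
      = acc ++ edgesA c := fun acc c => bodyA_eq acc c
  have hA : ∀ (Q : List (List Int)) (acc : List (List Int)),
      Q.foldl (fun Edges Chromosome =>
        (PySem.List.pyRange 1 ((ChromosomeToCycle Chromosome).length : Int) 2).foldl (fun Edges j =>
          if j ≠ ((ChromosomeToCycle Chromosome).length : Int) - 1 then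
            Edges ++ [[PySem.List.pyGetD (ChromosomeToCycle Chromosome) j 0,
                       PySem.List.pyGetD (ChromosomeToCycle Chromosome) (j + 1) 0]]
          else
            Edges ++ [[PySem.List.pyGetD (ChromosomeToCycle Chromosome) j 0,
                       PySem.List.pyGetD (ChromosomeToCycle Chromosome) 0 0]]) Edges) acc
      = acc ++ Q.flatMap edgesA := by
    intro Q
    induction Q with
    | nil => intro acc; simp
    | cons c t ih =>
      intro acc
      simp only [List.foldl_cons, List.flatMap_cons, hb acc c, ih, List.append_assoc]
  rw [hA P []]
  have hB : P.foldl (fun Edges Chromosome =>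
      Edges ++ (List.range Chromosome.length).map (fun i =>
        [(Chromosome.map tailOf).getD i 0,
         (Chromosome.map headOf).getD ((i + 1) % Chromosome.length) 0])) []
      = [] ++ P.flatMap edgesB := by
    rw [PySem.List.foldl_append_eq_flatMap]
    rfl
  rw [hB]
  simp only [List.nil_append]
  congr 1
  funext c
  exact edges_eq c

-- ===== VERDICT (by name: the statement is the Claim_ definition above) =====
theorem ColoredEdges_spec : Claim_equal_ColoredEdges := by
  intro P _
  unfold Spec_ColoredEdges
  exact ports_eq P
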